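-- pv_equiv track=rewrite | github.com/hotelUpz/afb_betta5 | CORE/universe.py | _pairwise_common_counts
-- ===== SOURCE A (Python) =====
-- from typing import Dict, Iterable, Optional, Set, Tuple
--
-- def _pairwise_common_counts(per_sets: Dict[str, Set[str]]) -> Dict[str, Dict[str, int]]:
--     names = sorted(per_sets.keys())
--     out: Dict[str, Dict[str, int]] = {a: {} for a in names}
--     for i, a in enumerate(names):
--         sa = per_sets.get(a, set())
--         for b in names[i + 1:]:
--             sb = per_sets.get(b, set())
--             c = len(sa & sb)
--             out[a][b] = c
--             out.setdefault(b, {})[a] = c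
--     return out
-- ===== SOURCE B (Python) =====
-- def _pairwise_common_counts(per_sets):
--     names = sorted(per_sets.keys())
--     # inverted index: element -> names whose set contains it (in sorted-name order)
--     inv = {}
--     for a in names:
--         for el in per_sets[a]:
--             inv.setdefault(el, []).append(a)
--     # one increment per (element, co-occurring ordered name pair)
--     counts = {}
--     for members in inv.values():
--         for i, x in enumerate(members):
--             for y in members[i + 1:]:
--                 counts[(x, y)] = counts.get((x, y), 0) + 1
--     out = {}
--     for a in names:
--         row = {}
--         for b in names:
--             if b != a:
--                 row[b] = counts.get((a, b) if a < b else (b, a), 0)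
--         out[a] = row
--     return out
-- ===== Notes on version B (the rewrite author's own statement) =====
-- stated objective: alternative
-- what changed: Replaces the quadratic loop of pairwise set intersections with an inverted element-to-names index whose co-occurring name pairs are each counted once, the output rows then being filled by dictionary lookup.
-- outside the precondition, e.g. on _pairwise_common_counts({'a': ['x', 'x'], 'b': ['x']}): A raises TypeError, B returns {'a': {'b': 2}, 'b': {'a': 2}}
import Mathlib
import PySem

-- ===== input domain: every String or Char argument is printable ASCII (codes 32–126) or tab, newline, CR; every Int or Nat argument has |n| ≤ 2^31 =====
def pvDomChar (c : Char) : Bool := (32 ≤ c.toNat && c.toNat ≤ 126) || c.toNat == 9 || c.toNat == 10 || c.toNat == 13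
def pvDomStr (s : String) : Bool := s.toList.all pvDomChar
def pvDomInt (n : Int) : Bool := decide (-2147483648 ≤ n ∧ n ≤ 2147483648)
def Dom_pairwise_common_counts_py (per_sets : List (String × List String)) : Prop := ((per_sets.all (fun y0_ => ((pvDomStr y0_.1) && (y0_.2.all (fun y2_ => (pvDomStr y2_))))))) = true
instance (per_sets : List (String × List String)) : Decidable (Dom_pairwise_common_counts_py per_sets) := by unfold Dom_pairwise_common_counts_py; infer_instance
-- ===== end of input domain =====

-- B replaces the pairwise set-intersection double loop by an inverted element-to-names index
-- whose co-occurring name pairs are counted once (objective: alternative).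


-- ===== PORT A =====
-- Transliteration of A.  `out[a][b] = c` and `out.setdefault(b, {})[a] = c` act on keys that are
-- guaranteed present (every name was initialised in `out`), so `modify`/`setdefault` are exact here.
def pairwise_common_counts_py (per_sets : List (String × List String)) : List (String × List (String × Int)) :=
  let d := PySem.Dict.ofList per_sets
  let names := PySem.List.sorted d.keys (fun x => x) false
  let out0 : PySem.Dict String (PySem.Dict String Int) :=
    names.foldl (fun o a => o.insert a PySem.Dict.empty) PySem.Dict.empty
  let out :=
    (PySem.List.enumerate names 0).foldl (fun o ia =>
      let a := ia.2
      let sa := d.getD a []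
      (PySem.List.slice names (some (ia.1 + 1)) none).foldl (fun o b =>
        let sb := d.getD b []
        let c : Int := ((PySem.Set.inter (PySem.Set.ofList sa) sb).length : Int)
        let o1 := o.modify a PySem.Dict.empty (fun da => da.insert b c)
        (o1.setdefault b PySem.Dict.empty).modify b PySem.Dict.empty (fun db => db.insert a c)) o) out0
  out.items.map (fun p => (p.1, p.2.items))

-- ===== PORT B =====
-- Transliteration of B.  `per_sets[a]` is looked up with default [] — `a` comes from the key list,
-- so the KeyError branch is unreachable.  B iterates over the stored sets only to build `inv`,
-- whose aggregate counts do not depend on that iteration order.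
def pairwise_common_counts_py_alt (per_sets : List (String × List String)) : List (String × List (String × Int)) :=
  let d := PySem.Dict.ofList per_sets
  let names := PySem.List.sorted d.keys (fun x => x) false
  let inv : PySem.Dict String (List String) :=
    names.foldl (fun inv a =>
      (d.getD a []).foldl (fun inv el =>
        (inv.setdefault el []).modify el [] (fun l => l ++ [a])) inv) PySem.Dict.empty
  let counts : PySem.Dict (String × String) Int :=
    inv.values.foldl (fun cnt members =>
      (PySem.List.enumerate members 0).foldl (fun cnt ix =>
        (PySem.List.slice members (some (ix.1 + 1)) none).foldl (fun cnt y =>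
          cnt.insert (ix.2, y) (cnt.getD (ix.2, y) 0 + 1)) cnt) cnt) PySem.Dict.empty
  let out : PySem.Dict String (PySem.Dict String Int) :=
    names.foldl (fun out a =>
      let row : PySem.Dict String Int :=
        names.foldl (fun row b =>
          if b ≠ a then
            row.insert b (counts.getD (if a < b then (a, b) else (b, a)) 0)
          else row) PySem.Dict.empty
      out.insert a row) PySem.Dict.empty
  out.items.map (fun p => (p.1, p.2.items))

-- ===== PRECONDITION & SPEC =====
-- Pre_ excludes only invalid encodings of the input: each value list encodes a Python set, so its
-- elements must be distinct; Python A does not even accept a duplicate-carrying list there (its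
-- `sa & sb` raises TypeError on lists, sets cannot hold duplicates).
def Pre_pairwise_common_counts_py (per_sets : List (String × List String)) : Prop :=
  ∀ p ∈ per_sets, p.2.Nodup
instance (per_sets : List (String × List String)) : Decidable (Pre_pairwise_common_counts_py per_sets) := by
  unfold Pre_pairwise_common_counts_py; infer_instance
def pvWitness_pairwise_common_counts_py : (List (String × List String)) :=
  [("a", ["x", "y"]), ("b", ["y"])]
def Spec_pairwise_common_counts_py (per_sets : List (String × List String)) (out : List (String × List (String × Int))) : Prop :=
  out = pairwise_common_counts_py_alt per_sets
instance (per_sets : List (String × List String)) (out : List (String × List (String × Int))) : Decidable (Spec_pairwise_common_counts_py per_sets out) := by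
  unfold Spec_pairwise_common_counts_py; infer_instance

-- ===== CLAIM =====
def Claim_equal_pairwise_common_counts_py : Prop :=
  ∀ (per_sets : List (String × List String)), Dom_pairwise_common_counts_py per_sets →
    Pre_pairwise_common_counts_py per_sets →
    Spec_pairwise_common_counts_py per_sets (pairwise_common_counts_py per_sets)

-- ===== LEMMAS AND PROOFS =====

/-- Fold over the tails of a list: at element `a` the function also sees the rest of the list. -/
def pvTailsFold {α β : Type} (g : α → List α → β → β) : List α → β → β
  | [], o => o
  | a :: rest, o => pvTailsFold g rest (g a rest o)

/-- All ordered pairs (earlier, later) of a list. -/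
def pvPairsOf : List String → List (String × String)
  | [] => []
  | x :: t => t.map (fun y => (x, y)) ++ pvPairsOf t

def pvCnt (d : PySem.Dict String (List String)) (a b : String) : Int :=
  ((PySem.Set.inter (PySem.Set.ofList (d.getD a [])) (d.getD b [])).length : Int)

def pvE (d : PySem.Dict String (List String)) (a b : String) : Int :=
  if a < b then pvCnt d a b else pvCnt d b a

def pvNames (per_sets : List (String × List String)) : List String :=
  PySem.List.sorted (PySem.Dict.ofList per_sets).keys (fun x => x) false

def pvCanon (d : PySem.Dict String (List String)) (ns : List String) : List (String × List (String × Int)) :=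
  ns.map (fun a => (a, (ns.filter (fun b => b ≠ a)).map (fun b => (b, pvE d a b))))

def pvStepA (d : PySem.Dict String (List String)) :
    String → List String → PySem.Dict String (PySem.Dict String Int) → PySem.Dict String (PySem.Dict String Int) :=
  fun a rest o => rest.foldl (fun o b =>
    ((o.modify a PySem.Dict.empty (fun da => da.insert b (pvCnt d a b))).setdefault b
        PySem.Dict.empty).modify b PySem.Dict.empty (fun db => db.insert a (pvCnt d a b))) o

def pvStepB : String → List String → PySem.Dict (String × String) Int → PySem.Dict (String × String) Int :=
  fun x rest cnt => rest.foldl (fun cnt y => cnt.insert (x, y) (cnt.getD (x, y) 0 + 1)) cnt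

def pvRow (d : PySem.Dict String (List String)) (x : String) (P : List String) : PySem.Dict String Int :=
  PySem.Dict.mk (P.map (fun y => (y, pvE d x y)))

def pvState (ns : List String) (d : PySem.Dict String (List String))
    (o : PySem.Dict String (PySem.Dict String Int)) (P : String → List String) : Prop :=
  o.keys = ns ∧ ∀ x ∈ ns, o.getD x PySem.Dict.empty = pvRow d x (P x)

lemma pv_foldl_enumerate_slice {α β : Type} (full : List α) (g : α → List α → β → β) :
    ∀ (l : List α) (k : Nat) (o : β), l = full.drop k →
    (PySem.List.enumerate l (k : Int)).foldl
      (fun o ia => g ia.2 (PySem.List.slice full (some (ia.1 + 1)) none) o) o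
      = pvTailsFold g l o := by
  intro l
  induction l with
  | nil => intro k o _; simp [PySem.List.enumerate_nil, pvTailsFold]
  | cons a rest ih =>
    intro k o hl
    simp only [PySem.List.enumerate_cons, List.foldl_cons]
    have h1 : (k : Int) + 1 = ((k + 1 : Nat) : Int) := by push_cast; ring
    have hrest : rest = full.drop (k + 1) := by rw [← List.tail_drop, ← hl]; rfl
    rw [h1, PySem.List.slice_from_natCast, ← hrest]
    exact ih (k + 1) _ hrest

lemma pv_mk_insert_fresh {ν : Type} (l : List (String × ν)) (y : String) (v : ν)
    (h : ∀ p ∈ l, p.1 ≠ y) :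
    (PySem.Dict.mk l).insert y v = PySem.Dict.mk (l ++ [(y, v)]) := by
  have hc : (PySem.Dict.mk l).contains y = false := by
    cases hcy : (PySem.Dict.mk l).contains y with
    | false => rfl
    | true =>
      exfalso
      have hmem := (PySem.Dict.contains_iff_mem_keys _ _).mp hcy
      simp only [PySem.Dict.keys, List.mem_map] at hmem
      obtain ⟨p, hp, hpy⟩ := hmem
      exact h p hp hpy
  apply PySem.Dict.ext
  rw [PySem.Dict.items_insert_of_not_contains _ _ hc]

lemma pv_setdefault_modify {κ ν : Type} [BEq κ] [LawfulBEq κ]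
    (d : PySem.Dict κ ν) (k : κ) (d0 : ν) (f : ν → ν) :
    (d.setdefault k d0).modify k d0 f = d.modify k d0 f := by
  by_cases hc : d.contains k = true
  · rw [PySem.Dict.setdefault_of_contains _ _ hc]
  · have hc' : d.contains k = false := by simpa using hc
    rw [PySem.Dict.setdefault_of_not_contains _ _ hc']
    show (d.insert k d0).insert k (f ((d.insert k d0).getD k d0)) = d.insert k (f (d.getD k d0))
    rw [PySem.Dict.getD_insert_self, PySem.Dict.insert_insert_self,
      PySem.Dict.getD_of_not_contains _ _ hc']

lemma pv_tails_pairs :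
    ∀ (l : List String) (cnt : PySem.Dict (String × String) Int),
      pvTailsFold pvStepB l cnt
        = (pvPairsOf l).foldl (fun cnt k => cnt.insert k (cnt.getD k 0 + 1)) cnt := by
  intro l
  induction l with
  | nil => intro cnt; rfl
  | cons x t ih =>
    intro cnt
    show pvTailsFold pvStepB t (pvStepB x t cnt) = _
    rw [show pvPairsOf (x :: t) = t.map (fun y => (x, y)) ++ pvPairsOf t from rfl,
      List.foldl_append, List.foldl_map, ih]
    rfl

lemma pv_per_set (a el : String) :
    ∀ (s : List String), s.Nodup →
      ((s.map (fun e => (e, a))).filter (fun p => p.1 == el)).map (fun p => p.2)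
        = if el ∈ s then [a] else [] := by
  intro s
  induction s with
  | nil => intro _; simp
  | cons e t ih =>
    intro hs
    have ih' := ih (List.nodup_cons.mp hs).2
    by_cases he : e = el
    · subst he
      have hent : e ∉ t := (List.nodup_cons.mp hs).1
      have ht : ((t.map (fun e => (e, a))).filter (fun p => p.1 == e)).map (fun p => p.2) = [] := by
        rw [ih']; simp [hent]
      simp [ht]
    · have hbe : (e == el) = false := by simpa using he
      have hel : ¬ el = e := fun h => he h.symm
      simp [hbe, ih', hel]

lemma pv_flatMap_filter (l : List String) (f : String → List String) (p : String → Bool)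
    (h : ∀ a ∈ l, f a = if p a then [a] else []) : l.flatMap f = l.filter p := by
  induction l with
  | nil => rfl
  | cons a t ih =>
    rw [List.flatMap_cons, h a List.mem_cons_self, List.filter_cons,
      ih (fun b hb => h b (List.mem_cons_of_mem _ hb))]
    by_cases hp : p a <;> simp [hp]

lemma pv_count_pairsOf (a b : String) (hab : a < b) :
    ∀ (l : List String), l.Pairwise (· < ·) →
      (pvPairsOf l).count (a, b) = if a ∈ l ∧ b ∈ l then 1 else 0 := by
  intro l
  induction l with
  | nil => intro _; simp [pvPairsOf]
  | cons x t ih =>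
    intro hl
    have hx : ∀ y ∈ t, x < y := (List.pairwise_cons.mp hl).1
    have hlt : t.Pairwise (· < ·) := (List.pairwise_cons.mp hl).2
    have hndt : t.Nodup := hlt.imp (fun h => ne_of_lt h)
    have ih' := ih hlt
    rw [show pvPairsOf (x :: t) = t.map (fun y => (x, y)) ++ pvPairsOf t from rfl,
      List.count_append, ih']
    by_cases hxa : x = a
    · subst hxa
      have hxnt : x ∉ t := fun hm => lt_irrefl x (hx x hm)
      have hmap : (t.map (fun y => (x, y))).count (x, b) = t.count b :=
        List.count_map_of_injective t (fun y => (x, y)) (fun _ _ h => (Prod.mk.injEq _ _ _ _).mp h |>.2) b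
      have hbx : b ≠ x := (ne_of_lt hab).symm
      by_cases hbt : b ∈ t
      · simp [hmap, hxnt, hbt, List.count_eq_one_of_mem hndt hbt]
      · simp [hmap, hxnt, hbt, List.count_eq_zero_of_not_mem hbt, hbx]
    · have hmap : (t.map (fun y => (x, y))).count (a, b) = 0 := by
        refine List.count_eq_zero.mpr ?_
        intro hm
        obtain ⟨y, _, hy⟩ := List.mem_map.mp hm
        exact hxa ((Prod.mk.injEq _ _ _ _).mp hy).1
      have hax : a ≠ x := fun h => hxa h.symm
      by_cases hbxx : b = x
      · subst hbxx
        have hat : a ∉ t := fun ha => absurd (hx a ha) (not_lt.mpr hab.le)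
        simp [hmap, hat, hax]
      · simp [hmap, hax, hbxx]

lemma pv_count_flatMap {α : Type} (key : α) (P : String → Prop) [DecidablePred P]
    (g : String → List α) [BEq α] [LawfulBEq α] :
    ∀ (els : List String), (∀ el ∈ els, (g el).count key = if P el then 1 else 0) →
      (els.flatMap g).count key = els.countP (fun el => decide (P el)) := by
  intro els
  induction els with
  | nil => intro _; rfl
  | cons e t ih =>
    intro h
    rw [List.flatMap_cons, List.count_append, h e List.mem_cons_self,
      ih (fun b hb => h b (List.mem_cons_of_mem _ hb)), List.countP_cons]
    by_cases hp : P e <;> simp [hp, Nat.add_comm]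

lemma pvState_congr (ns : List String) (d : PySem.Dict String (List String))
    (o : PySem.Dict String (PySem.Dict String Int)) (P Q : String → List String)
    (h : ∀ x ∈ ns, P x = Q x) (hs : pvState ns d o P) : pvState ns d o Q :=
  ⟨hs.1, fun x hx => by rw [hs.2 x hx, h x hx]⟩

lemma pvRow_insert (d : PySem.Dict String (List String)) (x : String) (P : List String)
    (y : String) (hy : y ∉ P) (v : Int) :
    (pvRow d x P).insert y v = PySem.Dict.mk (P.map (fun z => (z, pvE d x z)) ++ [(y, v)]) := by
  refine pv_mk_insert_fresh _ _ _ ?_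
  intro p hp hpy
  obtain ⟨z, hz, rfl⟩ := List.mem_map.mp hp
  exact hy (hpy ▸ hz)

lemma pvStep (ns : List String) (d : PySem.Dict String (List String))
    (o : PySem.Dict String (PySem.Dict String Int)) (P : String → List String) (a b : String)
    (h : pvState ns d o P) (ha : a ∈ ns) (hb : b ∈ ns) (hab : a < b)
    (hfa : b ∉ P a) (hfb : a ∉ P b) :
    pvState ns d
      (((o.modify a PySem.Dict.empty (fun da => da.insert b (pvCnt d a b))).setdefault b
          PySem.Dict.empty).modify b PySem.Dict.empty (fun db => db.insert a (pvCnt d a b)))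
      (fun x => if x = a then P a ++ [b] else if x = b then P x ++ [a] else P x) := by
  have hne : a ≠ b := ne_of_lt hab
  obtain ⟨hk, hg⟩ := h
  have hca : o.contains a = true := (PySem.Dict.contains_iff_mem_keys _ _).mpr (by rw [hk]; exact ha)
  have hk1 : (o.modify a PySem.Dict.empty (fun da => da.insert b (pvCnt d a b))).keys = ns := by
    rw [PySem.Dict.keys_modify, PySem.Dict.keys_insert_of_contains _ _ hca, hk]
  have hcb1 : (o.modify a PySem.Dict.empty (fun da => da.insert b (pvCnt d a b))).contains b = true :=
    (PySem.Dict.contains_iff_mem_keys _ _).mpr (by rw [hk1]; exact hb)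
  rw [PySem.Dict.setdefault_of_contains _ _ hcb1]
  constructor
  · rw [PySem.Dict.keys_modify, PySem.Dict.keys_insert_of_contains _ _ hcb1, hk1]
  · intro x hx
    have hEba : pvE d b a = pvCnt d a b := by
      simp only [pvE, if_neg (not_lt.mpr hab.le)]
    have hEab : pvE d a b = pvCnt d a b := by
      simp only [pvE, if_pos hab]
    by_cases hxb : x = b
    · subst hxb
      rw [PySem.Dict.getD_modify, if_pos rfl, PySem.Dict.getD_modify, if_neg hne.symm,
        hg x hx, pvRow_insert d x (P x) a hfb]
      have hxna : x ≠ a := Ne.symm hne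
      simp [pvRow, hEba, hxna]
    · by_cases hxa : x = a
      · subst hxa
        rw [PySem.Dict.getD_modify, if_neg hxb, PySem.Dict.getD_modify, if_pos rfl,
          hg x hx, pvRow_insert d x (P x) b hfa]
        simp [pvRow, hEab]
      · rw [PySem.Dict.getD_modify, if_neg hxb, PySem.Dict.getD_modify, if_neg hxa,
          hg x hx]
        simp [hxa, hxb]

lemma pvInner (ns : List String) (d : PySem.Dict String (List String)) (a : String) (ha : a ∈ ns) :
    ∀ (bs : List String) (o : PySem.Dict String (PySem.Dict String Int)) (P : String → List String),
      pvState ns d o P → bs.Nodup → a ∉ bs →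
      (∀ b ∈ bs, b ∈ ns ∧ a < b ∧ b ∉ P a ∧ a ∉ P b) →
      pvState ns d (pvStepA d a bs o)
        (fun x => if x = a then P a ++ bs else if x ∈ bs then P x ++ [a] else P x) := by
  intro bs
  induction bs with
  | nil =>
    intro o P h _ _ _
    refine pvState_congr ns d o P _ ?_ h
    intro x _
    by_cases hxa : x = a <;> simp [hxa]
  | cons b bs ih =>
    intro o P h hnd hna hcond
    obtain ⟨hbns, hab, hba, hbb⟩ := hcond b List.mem_cons_self
    have hanb : a ≠ b := ne_of_lt hab
    have habs : a ∉ bs := fun hx => hna (List.mem_cons_of_mem _ hx)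
    have hbbs : b ∉ bs := (List.nodup_cons.mp hnd).1
    have h1 := pvStep ns d o P a b h ha hbns hab hba hbb
    have h2 := ih _ _ h1 (List.nodup_cons.mp hnd).2 habs ?_
    · refine pvState_congr ns d _ _ _ ?_ h2
      intro x _
      by_cases hxa : x = a
      · subst hxa; simp
      · by_cases hxb : x = b
        · subst hxb; simp [hxa, hbbs]
        · by_cases hxbs : x ∈ bs <;> simp [hxa, hxb, hxbs]
    · intro b' hb'
      obtain ⟨hb'ns, hab', hb'a, hab'P⟩ := hcond b' (List.mem_cons_of_mem _ hb')
      have hb'b : b' ≠ b := fun h => hbbs (h ▸ hb')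
      have hb'a' : b' ≠ a := fun h => habs (h ▸ hb')
      refine ⟨hb'ns, hab', ?_, ?_⟩
      · show b' ∉ (if a = a then P a ++ [b] else if a = b then P a ++ [a] else P a)
        rw [if_pos rfl]
        intro hmem
        rcases List.mem_append.mp hmem with hm | hm
        · exact hb'a hm
        · exact hb'b (List.mem_singleton.mp hm)
      · show a ∉ (if b' = a then P a ++ [b] else if b' = b then P b' ++ [a] else P b')
        rw [if_neg hb'a', if_neg hb'b]
        exact hab'P

lemma pvOuter (ns : List String) (d : PySem.Dict String (List String))
    (hlt : ns.Pairwise (· < ·)) :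
    ∀ (todo done : List String) (o : PySem.Dict String (PySem.Dict String Int)),
      ns = done ++ todo →
      pvState ns d o (fun x => if x ∈ todo then done else ns.filter (fun y => y ≠ x)) →
      pvState ns d (pvTailsFold (pvStepA d) todo o) (fun x => ns.filter (fun y => y ≠ x)) := by
  intro todo
  induction todo with
  | nil =>
    intro done o _ h
    refine pvState_congr ns d o _ _ ?_ h
    intro x _; simp
  | cons a rest ih =>
    intro done o hsplit h
    have hnd : ns.Nodup := hlt.imp (fun h => ne_of_lt h)
    have hpw := (List.pairwise_append.mp (hsplit ▸ hlt)).2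
    have harest : ∀ b ∈ rest, a < b := (List.pairwise_cons.mp hpw.1).1
    have hndn := hsplit ▸ hnd
    have hdisj := (List.nodup_append.mp hndn).2.2
    have hndc := (List.nodup_append.mp hndn).2.1
    have hanrest : a ∉ rest := (List.nodup_cons.mp hndc).1
    have hndrest : rest.Nodup := (List.nodup_cons.mp hndc).2
    have hadone : a ∉ done := fun hx => hdisj a hx a List.mem_cons_self rfl
    have hans : a ∈ ns := by rw [hsplit]; exact List.mem_append.mpr (Or.inr List.mem_cons_self)
    show pvState ns d (pvTailsFold (pvStepA d) rest (pvStepA d a rest o)) _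
    have hfa : done ++ rest = ns.filter (fun y => y ≠ a) := by
      rw [hsplit, List.filter_append, List.filter_cons]
      have h1 : done.filter (fun y => y ≠ a) = done :=
        List.filter_eq_self.mpr (fun y hy => by simpa using hdisj y hy a List.mem_cons_self)
      have h2 : rest.filter (fun y => y ≠ a) = rest :=
        List.filter_eq_self.mpr (fun y hy => by
          simpa using fun h : y = a => hanrest (h ▸ hy))
      rw [h1, h2]
      simp
    have hin := pvInner ns d a hans rest o _ h hndrest hanrest ?_
    · refine ih (done ++ [a]) _ (by rw [hsplit]; simp) ?_
      refine pvState_congr ns d _ _ _ ?_ hin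
      intro x _
      by_cases hxa : x = a
      · subst hxa
        have hmm : x ∈ x :: rest := List.mem_cons_self
        simp only [if_pos hmm, if_neg hanrest]
        exact hfa
      · by_cases hxr : x ∈ rest
        · simp [hxa, hxr, List.mem_cons_of_mem a hxr]
        · have hxar : x ∉ a :: rest := by
            intro hm; rcases List.mem_cons.mp hm with h | h
            · exact hxa h
            · exact hxr h
          simp [hxa, hxr, hxar]
    · intro b hb
      have hbna : b ≠ a := fun h => hanrest (h ▸ hb)
      refine ⟨by rw [hsplit]; exact List.mem_append.mpr (Or.inr (List.mem_cons_of_mem _ hb)),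
        harest b hb, ?_, ?_⟩
      · show b ∉ (if a ∈ a :: rest then done else ns.filter (fun y => y ≠ a))
        rw [if_pos List.mem_cons_self]
        exact fun hm => hdisj b hm b (List.mem_cons_of_mem _ hb) rfl
      · show a ∉ (if b ∈ a :: rest then done else ns.filter (fun y => y ≠ b))
        rw [if_pos (List.mem_cons_of_mem a hb)]
        exact hadone

lemma pv_ns_nodup (per_sets : List (String × List String)) : (pvNames per_sets).Nodup :=
  ((PySem.List.sorted_perm _ _ _).nodup_iff).mpr (PySem.Dict.nodup_keys_ofList per_sets)

lemma pv_ns_lt (per_sets : List (String × List String)) : (pvNames per_sets).Pairwise (· < ·) := by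
  have hle : (pvNames per_sets).Pairwise (fun a b => a ≤ b) :=
    PySem.List.sorted_pairwise _ (fun x => x)
  have hne : (pvNames per_sets).Pairwise (fun a b => a ≠ b) := pv_ns_nodup per_sets
  exact (hle.and hne).imp (fun h => lt_of_le_of_ne h.1 h.2)

lemma pvA_canon (per_sets : List (String × List String)) :
    pairwise_common_counts_py per_sets
      = pvCanon (PySem.Dict.ofList per_sets) (pvNames per_sets) := by
  have hnd := pv_ns_nodup per_sets
  have hlt := pv_ns_lt per_sets
  set d := PySem.Dict.ofList per_sets with hd
  set ns := pvNames per_sets with hns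
  have hitems0 : (ns.foldl (fun o a => o.insert a PySem.Dict.empty)
      (PySem.Dict.empty : PySem.Dict String (PySem.Dict String Int))).items
      = ns.map (fun a => (a, (PySem.Dict.empty : PySem.Dict String Int))) := by
    have := PySem.Dict.items_foldl_insert_fresh ns (fun a => a)
      (fun _ => (PySem.Dict.empty : PySem.Dict String Int)) PySem.Dict.empty
      (fun _ _ => PySem.Dict.contains_empty _) (by simpa using hnd)
    simpa using this
  have hkeys0 : (ns.foldl (fun o a => o.insert a PySem.Dict.empty)
      (PySem.Dict.empty : PySem.Dict String (PySem.Dict String Int))).keys = ns := by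
    simp only [PySem.Dict.keys]
    rw [hitems0, List.map_map]
    simp [Function.comp_def]
  have hstate0 : pvState ns d
      (ns.foldl (fun o a => o.insert a PySem.Dict.empty) PySem.Dict.empty)
      (fun x => if x ∈ ns then [] else ns.filter (fun y => y ≠ x)) := by
    refine ⟨hkeys0, ?_⟩
    intro x hx
    have hmem : (x, (PySem.Dict.empty : PySem.Dict String Int)) ∈
        (ns.foldl (fun o a => o.insert a PySem.Dict.empty) PySem.Dict.empty).items := by
      rw [hitems0]; exact List.mem_map.mpr ⟨x, hx, rfl⟩
    rw [PySem.Dict.getD_of_mem_items _ hmem (by rw [hkeys0]; exact hnd)]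
    show (PySem.Dict.empty : PySem.Dict String Int)
        = pvRow d x (if x ∈ ns then [] else ns.filter (fun y => y ≠ x))
    rw [if_pos hx]
    rfl
  have hbridge : (PySem.List.enumerate ns 0).foldl
      (fun o ia => pvStepA d ia.2 (PySem.List.slice ns (some (ia.1 + 1)) none) o)
      (ns.foldl (fun o a => o.insert a PySem.Dict.empty) PySem.Dict.empty)
      = pvTailsFold (pvStepA d) ns
        (ns.foldl (fun o a => o.insert a PySem.Dict.empty) PySem.Dict.empty) :=
    pv_foldl_enumerate_slice ns (pvStepA d) ns 0 _ (by simp)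
  have hfinal := pvOuter ns d hlt ns [] _ (by simp) hstate0
  show ((PySem.List.enumerate ns 0).foldl
      (fun o ia => pvStepA d ia.2 (PySem.List.slice ns (some (ia.1 + 1)) none) o)
      (ns.foldl (fun o a => o.insert a PySem.Dict.empty) PySem.Dict.empty)).items.map
      (fun p => (p.1, p.2.items)) = pvCanon d ns
  rw [hbridge]
  obtain ⟨hk, hg⟩ := hfinal
  rw [PySem.Dict.items_eq_map_keys _ (by rw [hk]; exact hnd) PySem.Dict.empty, hk,
    List.map_map]
  simp only [pvCanon]
  refine List.map_congr_left ?_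
  intro a hax
  simp only [Function.comp]
  rw [hg a hax]
  rfl

lemma pv_mem_items_ofList {κ ν : Type} [BEq κ] [LawfulBEq κ] (l : List (κ × ν)) :
    ∀ p ∈ (PySem.Dict.ofList l).items, p ∈ l := by
  have hgen : ∀ (l : List (κ × ν)) (d : PySem.Dict κ ν) (p : κ × ν),
      p ∈ (l.foldl (fun acc q => acc.insert q.1 q.2) d).items → p ∈ d.items ∨ p ∈ l := by
    intro l
    induction l with
    | nil => intro d p h; exact Or.inl h
    | cons q t ih =>
      intro d p h
      rcases ih _ p h with h' | h'
      · rcases (PySem.Dict.mem_items_insert _ _ _ _).mp h' with h'' | h''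
        · exact Or.inr (by rw [h'']; exact List.mem_cons_self)
        · exact Or.inl h''.1
      · exact Or.inr (List.mem_cons_of_mem _ h')
  intro p hp
  rcases hgen l PySem.Dict.empty p hp with h | h
  · simp [PySem.Dict.empty] at h
  · exact h

lemma pv_vals_nodup (per_sets : List (String × List String))
    (hpre : ∀ p ∈ per_sets, p.2.Nodup) (x : String) :
    ((PySem.Dict.ofList per_sets).getD x []).Nodup := by
  rw [PySem.Dict.getD_eq_get?_getD]
  cases hq : (PySem.Dict.ofList per_sets).get? x with
  | none => simp
  | some v =>
    have := pv_mem_items_ofList per_sets _ (PySem.Dict.mem_items_of_get?_eq_some _ hq)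
    simpa using hpre _ this

lemma pvB_canon (per_sets : List (String × List String))
    (hpre : ∀ p ∈ per_sets, p.2.Nodup) :
    pairwise_common_counts_py_alt per_sets
      = pvCanon (PySem.Dict.ofList per_sets) (pvNames per_sets) := by
  have hnd := pv_ns_nodup per_sets
  have hlt := pv_ns_lt per_sets
  have hvals := pv_vals_nodup per_sets hpre
  set d := PySem.Dict.ofList per_sets with hd
  set ns := pvNames per_sets with hns
  set pairs := ns.flatMap (fun a => (d.getD a []).map (fun el => (el, a))) with hpairs
  set inv := ns.foldl (fun inv a =>
      (d.getD a []).foldl (fun inv el =>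
        (inv.setdefault el []).modify el [] (fun l => l ++ [a])) inv)
      (PySem.Dict.empty : PySem.Dict String (List String)) with hinvdef
  -- step 1: the inverted index is a flat modify-append fold
  have hinv_eq : inv = pairs.foldl (fun d2 p => d2.modify p.1 [] (fun l => l ++ [p.2]))
      PySem.Dict.empty := by
    rw [hinvdef, hpairs, List.foldl_flatMap]
    refine PySem.List.foldl_congr_mem _ _ _ _ ?_
    intro acc a _
    rw [List.foldl_map]
    refine PySem.List.foldl_congr_mem _ _ _ _ ?_
    intro d2 el _
    exact pv_setdefault_modify d2 el [] (fun l => l ++ [a])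
  have hmembers : ∀ el, inv.getD el []
      = ns.filter (fun a => decide (el ∈ d.getD a [])) := by
    intro el
    rw [hinv_eq]
    rw [PySem.Dict.getD_foldl_modify_append pairs PySem.Dict.empty el]
    rw [PySem.Dict.getD_empty, List.nil_append, hpairs, List.filter_flatMap,
      List.map_flatMap]
    refine pv_flatMap_filter ns _ _ ?_
    intro a _
    rw [pv_per_set a el (d.getD a []) (hvals a)]
    by_cases hmem : el ∈ d.getD a [] <;> simp [hmem]
  have hkeys_inv : inv.keys = PySem.Set.ofList (pairs.map (fun p => p.1)) := by
    rw [hinv_eq]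
    exact PySem.Dict.keys_foldl_modify_key pairs (fun p => p.1) []
      (fun _ p => fun l => l ++ [p.2]) PySem.Dict.empty
  have hnd_inv : inv.keys.Nodup := by
    rw [hkeys_inv]; exact PySem.Set.nodup_ofList _
  have hvalues : inv.values = (PySem.Set.ofList (pairs.map (fun p => p.1))).map
      (fun el => ns.filter (fun a => decide (el ∈ d.getD a []))) := by
    rw [PySem.Dict.values_eq_map_keys inv hnd_inv [], hkeys_inv]
    exact List.map_congr_left (fun el _ => hmembers el)
  -- step 2: counts is a flat increment fold over all co-occurrence pairs
  set counts := inv.values.foldl (fun cnt members =>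
      (PySem.List.enumerate members 0).foldl (fun cnt ix =>
        (PySem.List.slice members (some (ix.1 + 1)) none).foldl (fun cnt y =>
          cnt.insert (ix.2, y) (cnt.getD (ix.2, y) 0 + 1)) cnt) cnt)
      (PySem.Dict.empty : PySem.Dict (String × String) Int) with hcountsdef
  have hcounts_eq : counts = (inv.values.flatMap pvPairsOf).foldl
      (fun cnt k => cnt.insert k (cnt.getD k 0 + 1)) PySem.Dict.empty := by
    rw [hcountsdef, List.foldl_flatMap]
    refine PySem.List.foldl_congr_mem _ _ _ _ ?_
    intro acc members _
    rw [← pv_tails_pairs]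
    exact pv_foldl_enumerate_slice members pvStepB members 0 acc (by simp)
  have hcounts_getD : ∀ k, counts.getD k 0 = ((inv.values.flatMap pvPairsOf).count k : Int) := by
    intro k
    rw [hcounts_eq]
    have := PySem.Dict.getD_foldl_insert_add_one (inv.values.flatMap pvPairsOf)
      PySem.Dict.empty k
    simpa [PySem.Dict.getD_empty] using this
  -- step 3: the count of an ordered pair is the intersection size
  have hcount : ∀ a ∈ ns, ∀ b ∈ ns, a < b →
      counts.getD (a, b) 0 = pvCnt d a b := by
    intro a hans b hbns hab
    rw [hcounts_getD, hvalues, List.flatMap_map]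
    have hper : ∀ el, (pvPairsOf (ns.filter (fun x => decide (el ∈ d.getD x [])))).count (a, b)
        = if el ∈ d.getD a [] ∧ el ∈ d.getD b [] then 1 else 0 := by
      intro el
      rw [pv_count_pairsOf a b hab _ (hlt.filter _)]
      by_cases h1 : el ∈ d.getD a [] <;> by_cases h2 : el ∈ d.getD b [] <;>
        simp [List.mem_filter, hans, hbns, h1, h2]
    rw [pv_count_flatMap (a, b) (fun el => el ∈ d.getD a [] ∧ el ∈ d.getD b []) _ _
      (fun el _ => hper el)]
    rw [List.countP_eq_length_filter]
    have hperm : List.Perm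
        ((PySem.Set.ofList (pairs.map (fun p => p.1))).filter
          (fun el => decide (el ∈ d.getD a [] ∧ el ∈ d.getD b [])))
        ((d.getD a []).filter (fun x => PySem.Set.contains (d.getD b []) x)) := by
      refine (List.perm_ext_iff_of_nodup
        ((PySem.Set.nodup_ofList _).filter _) ((hvals a).filter _)).mpr ?_
      intro el
      simp only [List.mem_filter, PySem.Set.mem_ofList, decide_eq_true_eq]
      constructor
      · intro hel
        refine ⟨hel.2.1, ?_⟩
        simp only [PySem.Set.contains, List.contains_iff_exists_mem_beq]
        exact ⟨el, hel.2.2, by simp⟩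
      · intro hel
        have hb2 : el ∈ d.getD b [] := by
          have h2 := hel.2
          simp only [PySem.Set.contains, List.contains_iff_exists_mem_beq] at h2
          obtain ⟨y, hy, hbe⟩ := h2
          exact (beq_iff_eq.mp hbe) ▸ hy
        refine ⟨?_, hel.1, hb2⟩
        refine List.mem_map.mpr ⟨(el, a), ?_, rfl⟩
        rw [hpairs]
        exact List.mem_flatMap.mpr ⟨a, hans, List.mem_map.mpr ⟨el, hel.1, rfl⟩⟩
    have hpv : pvCnt d a b = (((d.getD a []).filter
        (fun x => PySem.Set.contains (d.getD b []) x)).length : Int) := by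
      simp only [pvCnt, PySem.Set.inter, PySem.Set.ofList_eq_self_of_nodup _ (hvals a)]
    rw [hpv]
    exact congrArg (fun n : Nat => (n : Int)) hperm.length_eq
  -- step 4: assemble the output
  show ((ns.foldl (fun out a =>
      out.insert a (ns.foldl (fun row b =>
        if b ≠ a then row.insert b (counts.getD (if a < b then (a, b) else (b, a)) 0)
        else row) PySem.Dict.empty)) PySem.Dict.empty).items).map
      (fun p => (p.1, p.2.items)) = pvCanon d ns
  have hout_items : (ns.foldl (fun out a =>
      out.insert a (ns.foldl (fun row b =>
        if b ≠ a then row.insert b (counts.getD (if a < b then (a, b) else (b, a)) 0)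
        else row) PySem.Dict.empty)) PySem.Dict.empty).items
      = ns.map (fun a => (a, ns.foldl (fun row b =>
          if b ≠ a then row.insert b (counts.getD (if a < b then (a, b) else (b, a)) 0)
          else row) (PySem.Dict.empty : PySem.Dict String Int))) := by
    have := PySem.Dict.items_foldl_insert_fresh ns (fun a => a)
      (fun a => ns.foldl (fun row b =>
        if b ≠ a then row.insert b (counts.getD (if a < b then (a, b) else (b, a)) 0)
        else row) (PySem.Dict.empty : PySem.Dict String Int))
      PySem.Dict.empty (fun _ _ => PySem.Dict.contains_empty _) (by simpa using hnd)
    simpa using this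
  rw [hout_items, List.map_map]
  simp only [pvCanon]
  refine List.map_congr_left ?_
  intro a hax
  simp only [Function.comp]
  have hrow : (ns.foldl (fun row b =>
      if b ≠ a then row.insert b (counts.getD (if a < b then (a, b) else (b, a)) 0)
      else row) (PySem.Dict.empty : PySem.Dict String Int)).items
      = (ns.filter (fun b => b ≠ a)).map
        (fun b => (b, counts.getD (if a < b then (a, b) else (b, a)) 0)) := by
    rw [PySem.List.foldl_ite_eq_foldl_filter (fun b => b ≠ a)
      (fun row b => row.insert b (counts.getD (if a < b then (a, b) else (b, a)) 0)) ns
      PySem.Dict.empty]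
    have := PySem.Dict.items_foldl_insert_fresh (ns.filter (fun b => decide (b ≠ a)))
      (fun b => b) (fun b => counts.getD (if a < b then (a, b) else (b, a)) 0)
      PySem.Dict.empty (fun _ _ => PySem.Dict.contains_empty _)
      (by simpa using hnd.filter _)
    simpa using this
  rw [hrow]
  refine congrArg (fun l => (a, l)) ?_
  refine List.map_congr_left ?_
  intro b hbf
  have hbns : b ∈ ns := (List.mem_filter.mp hbf).1
  have hbna : b ≠ a := by simpa using (List.mem_filter.mp hbf).2
  refine congrArg (fun v => (b, v)) ?_
  by_cases hab : a < b
  · rw [if_pos hab, hcount a hax b hbns hab]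
    simp [pvE, hab]
  · have hba : b < a := lt_of_le_of_ne (not_lt.mp hab) hbna
    rw [if_neg hab, hcount b hbns a hax hba]
    simp [pvE, hab]

-- ===== VERDICT =====
theorem pairwise_common_counts_py_spec : Claim_equal_pairwise_common_counts_py := by
  intro per_sets _hdom hpre
  show pairwise_common_counts_py per_sets = pairwise_common_counts_py_alt per_sets
  rw [pvA_canon per_sets, pvB_canon per_sets hpre]
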